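-- pv_equiv track=rewrite | github.com/v7s7/AssetMangerApp | scan_and_register.py | auto_detect_group_and_type
-- ===== SOURCE A (Python) =====
-- def auto_detect_group_and_type(os_name, model):
--     os_name = (os_name or "").lower()
--     model = (model or "").lower()
--     if "windows" in os_name:
--         return "Windows", "PC"
--     elif any(k in os_name for k in ["linux", "ubuntu"]):
--         return "Servers & Infra", "Server"
--     elif any(k in os_name for k in ["ios", "android"]):
--         return "Mobile Device", "Mobile Phones"
--     elif any(k in model for k in ["vmware", "hyper-v"]):
--         return "Servers & Infra", "Server"
--     return "Windows", "PC"
-- ===== SOURCE B (Python) =====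
-- # Flat keyword table with priorities: collect ALL matching keywords, return the
-- # result of the minimum-priority match (argmin), default if nothing matches.
-- _TABLE = [
--     (0, 0, "windows", ("Windows", "PC")),
--     (1, 0, "linux", ("Servers & Infra", "Server")),
--     (1, 0, "ubuntu", ("Servers & Infra", "Server")),
--     (2, 0, "ios", ("Mobile Device", "Mobile Phones")),
--     (2, 0, "android", ("Mobile Device", "Mobile Phones")),
--     (3, 1, "vmware", ("Servers & Infra", "Server")),
--     (3, 1, "hyper-v", ("Servers & Infra", "Server")),
-- ]
--
--
-- def auto_detect_group_and_type(os_name, model):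
--     texts = ((os_name or "").lower(), (model or "").lower())
--     matches = [(prio, res) for prio, field, kw, res in _TABLE if kw in texts[field]]
--     if matches:
--         return min(matches, key=lambda m: m[0])[1]
--     return ("Windows", "PC")
-- ===== Notes on version B (the rewrite author's own statement) =====
-- stated objective: alternative
-- what changed: Replaced the short-circuiting if-elif cascade by exhaustive evaluation over a flat priority-tagged keyword table: collect all matching keywords, then return the result of the minimum-priority match (argmin), with the default when nothing matches.
import Mathlib
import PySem

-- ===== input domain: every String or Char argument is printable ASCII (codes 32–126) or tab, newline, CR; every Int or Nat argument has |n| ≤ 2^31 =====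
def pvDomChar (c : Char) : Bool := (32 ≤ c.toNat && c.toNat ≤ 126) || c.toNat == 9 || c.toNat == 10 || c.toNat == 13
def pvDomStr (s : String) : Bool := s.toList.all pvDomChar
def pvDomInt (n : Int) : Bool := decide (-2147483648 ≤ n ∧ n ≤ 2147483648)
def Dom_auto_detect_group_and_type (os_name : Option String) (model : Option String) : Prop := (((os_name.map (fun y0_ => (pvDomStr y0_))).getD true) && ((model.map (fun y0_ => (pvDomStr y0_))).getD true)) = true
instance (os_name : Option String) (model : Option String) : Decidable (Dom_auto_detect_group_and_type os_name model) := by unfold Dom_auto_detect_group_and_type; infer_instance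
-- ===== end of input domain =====

-- B replaces A's short-circuiting if-elif cascade by exhaustive matching over a flat
-- priority-tagged keyword table followed by an argmin over the matches; same results everywhere.


-- ===== PORT A =====
def auto_detect_group_and_type (os_name : Option String) (model : Option String) : String × String :=
  let os := PySem.Str.lower (os_name.getD "")
  let md := PySem.Str.lower (model.getD "")
  if PySem.Str.isIn "windows" os then ("Windows", "PC")
  else if (["linux", "ubuntu"].any (fun k => PySem.Str.isIn k os)) then ("Servers & Infra", "Server")
  else if (["ios", "android"].any (fun k => PySem.Str.isIn k os)) then ("Mobile Device", "Mobile Phones")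
  else if (["vmware", "hyper-v"].any (fun k => PySem.Str.isIn k md)) then ("Servers & Infra", "Server")
  else ("Windows", "PC")

-- ===== PORT B =====
-- (prio, field index, keyword, result); field 0 = os_name, field 1 = model
def pvTable : List (Int × Int × String × (String × String)) :=
  [ (0, 0, "windows", ("Windows", "PC")),
    (1, 0, "linux", ("Servers & Infra", "Server")),
    (1, 0, "ubuntu", ("Servers & Infra", "Server")),
    (2, 0, "ios", ("Mobile Device", "Mobile Phones")),
    (2, 0, "android", ("Mobile Device", "Mobile Phones")),
    (3, 1, "vmware", ("Servers & Infra", "Server")),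
    (3, 1, "hyper-v", ("Servers & Infra", "Server")) ]

def auto_detect_group_and_type_alt (os_name : Option String) (model : Option String) : String × String :=
  let texts : String × String := (PySem.Str.lower (os_name.getD ""), PySem.Str.lower (model.getD ""))
  let mts : List (Int × (String × String)) :=
    pvTable.filterMap (fun r =>
      if PySem.Str.isIn r.2.2.1 (if r.2.1 == 0 then texts.1 else texts.2)
      then some (r.1, r.2.2.2) else none)
  match PySem.List.min? mts (fun m => m.1) with
  | some m => m.2
  | none => ("Windows", "PC")

-- ===== PRECONDITION & SPEC =====
def Spec_auto_detect_group_and_type (os_name : Option String) (model : Option String) (out : String × String) : Prop := out = auto_detect_group_and_type_alt os_name model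
instance (os_name : Option String) (model : Option String) (out : String × String) : Decidable (Spec_auto_detect_group_and_type os_name model out) := by unfold Spec_auto_detect_group_and_type; infer_instance

-- ===== CLAIM (what is proved, stated in full; the proofs are below) =====
def Claim_equal_auto_detect_group_and_type : Prop := ∀ (os_name : Option String) (model : Option String), Dom_auto_detect_group_and_type os_name model → Spec_auto_detect_group_and_type os_name model (auto_detect_group_and_type os_name model)

-- ===== LEMMAS AND PROOFS =====

-- ===== VERDICT (by name: the statement is the Claim_ definition above) =====
theorem auto_detect_group_and_type_spec : Claim_equal_auto_detect_group_and_type := by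
  intro os_name model _
  unfold Spec_auto_detect_group_and_type auto_detect_group_and_type auto_detect_group_and_type_alt pvTable
  by_cases h1 : PySem.Str.isIn "windows" (PySem.Str.lower (os_name.getD "")) = true <;>
  by_cases h2 : PySem.Str.isIn "linux" (PySem.Str.lower (os_name.getD "")) = true <;>
  by_cases h3 : PySem.Str.isIn "ubuntu" (PySem.Str.lower (os_name.getD "")) = true <;>
  by_cases h4 : PySem.Str.isIn "ios" (PySem.Str.lower (os_name.getD "")) = true <;>
  by_cases h5 : PySem.Str.isIn "android" (PySem.Str.lower (os_name.getD "")) = true <;>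
  by_cases h6 : PySem.Str.isIn "vmware" (PySem.Str.lower (model.getD "")) = true <;>
  by_cases h7 : PySem.Str.isIn "hyper-v" (PySem.Str.lower (model.getD "")) = true <;>
  simp_all [PySem.List.min?, List.filterMap]
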